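-- pv_equiv track=rewrite | github.com/kifish/prac_code | pieces/文计助教/assignment7/example.py | content
-- ===== SOURCE A (Python) =====
-- def content(text):
--     flag = 1
--     result = ""
--     for i in text:
--         if i == "<":
--             flag = 0
--         elif i == ">":
--             i = ""
--             flag = 1
--         if flag == 1:
--             result = result+i
--     return result
-- ===== SOURCE B (Python) =====
-- def content(text):
--     res = []
--     i = 0
--     n = len(text)
--     while i < n:
--         c = text[i]
--         if c == '<':
--             j = text.find('>', i + 1)
--             if j == -1:
--                 break
--             i = j + 1
--         elif c == '>':
--             i += 1
--         else:
--             res.append(c)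
--             i += 1
--     return ''.join(res)
-- ===== Notes on version B (the rewrite author's own statement) =====
-- stated objective: idiomatic
-- what changed: Replaces the per-character flag state machine with an index scan that uses str.find to jump straight past each whole tag and joins a result list at the end.
import Mathlib
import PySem

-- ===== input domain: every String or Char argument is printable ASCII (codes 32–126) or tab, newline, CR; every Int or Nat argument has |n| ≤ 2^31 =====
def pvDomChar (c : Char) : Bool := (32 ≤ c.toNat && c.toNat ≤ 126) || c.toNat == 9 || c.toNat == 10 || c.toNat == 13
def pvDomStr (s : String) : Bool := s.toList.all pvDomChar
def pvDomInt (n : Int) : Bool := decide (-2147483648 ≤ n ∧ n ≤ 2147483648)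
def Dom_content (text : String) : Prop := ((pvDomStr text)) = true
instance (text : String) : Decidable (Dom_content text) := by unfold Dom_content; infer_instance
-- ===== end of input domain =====

-- B replaces A's per-character flag state machine by an index scan that jumps past each
-- whole tag with find('>', i); alternative/idiomatic, same return value on every string.

-- ===== PORT A =====
-- A's loop: state (flag, result); '<' sets flag 0; '>' sets i = "" and flag 1 (so the
-- append of "" is a no-op); otherwise append the char when flag == 1.
def contentStep (st : Int × List Char) (c : Char) : Int × List Char :=
  if c = '<' then (0, st.2)
  else if c = '>' then (1, st.2 ++ [])
  else (st.1, if st.1 = 1 then st.2 ++ [c] else st.2)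

def content (text : String) : String :=
  String.ofList (text.toList.foldl contentStep (1, [])).2

-- ===== PORT B =====
-- Source B's while loop over an index, ported as recursion on the remaining characters;
-- text.find('>', i+1) with the 'j == -1: break' case becomes dropWhile (· ≠ '>') on the rest
-- (empty result = not found = break; otherwise continue just past that '>').
def contentAltGo : List Char → List Char
  | [] => []
  | c :: rest =>
    if c = '<' then
      (if (rest.dropWhile (· ≠ '>')).isEmpty then []
       else contentAltGo (rest.dropWhile (· ≠ '>')).tail)
    else if c = '>' then contentAltGo rest
    else c :: contentAltGo rest
termination_by l => l.length
decreasing_by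
  · have h1 : (rest.dropWhile (· ≠ '>')).length ≤ rest.length := List.length_dropWhile_le _ _
    have h2 : (rest.dropWhile (· ≠ '>')).tail.length = (rest.dropWhile (· ≠ '>')).length - 1 :=
      List.length_tail
    simp only [List.length_cons]
    omega
  · simp
  · simp

def content_alt (text : String) : String :=
  String.ofList (contentAltGo text.toList)

-- ===== PRECONDITION & SPEC =====
def Spec_content (text : String) (out : String) : Prop := out = content_alt text
instance (text : String) (out : String) : Decidable (Spec_content text out) := by unfold Spec_content; infer_instance

-- ===== CLAIM (what is proved, stated in full; the proofs are below) =====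
def Claim_equal_content : Prop := ∀ (text : String), Dom_content text → Spec_content text (content text)

-- ===== LEMMAS AND PROOFS =====

-- With flag 0, A discards everything up to and including the first '>', then resumes with flag 1.
theorem contentStep_flag0 (cs : List Char) (res : List Char) :
    cs.foldl contentStep (0, res) =
      (match cs.dropWhile (· ≠ '>') with
       | [] => (0, res)
       | _ :: t => t.foldl contentStep (1, res)) := by
  induction cs with
  | nil => simp
  | cons c rest ih =>
    by_cases hgt : c = '>'
    · subst hgt; simp [List.foldl, contentStep, List.dropWhile]
    · by_cases hlt : c = '<' <;>
        simp [List.foldl, contentStep, hlt, hgt, List.dropWhile, ih]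

theorem content_go_eq (cs : List Char) (res : List Char) :
    (cs.foldl contentStep (1, res)).2 = res ++ contentAltGo cs := by
  induction cs using contentAltGo.induct generalizing res with
  | case1 => simp [contentAltGo]
  | case2 rest hnil =>
    -- c = '<', no '>' in the rest
    rw [List.isEmpty_iff] at hnil
    simp only [List.foldl, contentStep, reduceIte]
    rw [contentStep_flag0, hnil, contentAltGo, hnil]
    simp
  | case3 rest hne ih =>
    -- c = '<', a '>' found: continue just past it
    simp only [List.foldl, contentStep, reduceIte]
    rw [contentStep_flag0]
    rcases h : rest.dropWhile (· ≠ '>') with _ | ⟨hd, t⟩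
    · rw [h] at hne; simp at hne
    · rw [contentAltGo, h]
      rw [h] at ih
      simpa using ih res
  | case4 rest hne ih =>
    -- c = '>'
    simp_all [List.foldl, contentStep, contentAltGo]
  | case5 c rest hlt hgt ih =>
    simp only [List.foldl, contentStep, if_neg hlt, if_neg hgt]
    rw [ih, contentAltGo]
    simp [hlt, hgt]

-- ===== VERDICT (by name: the statement is the Claim_ definition above) =====
theorem content_spec : Claim_equal_content := by
  intro text _
  unfold Spec_content content content_alt
  rw [content_go_eq]
  simp
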